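-- pv_equiv track=rewrite | github.com/dhewgill/2025_aoc | day06.py | split_to_problems
-- ===== SOURCE A (Python) =====
-- def split_to_problems(probs: list[str]) -> list[list[str]]:
--     problem_list = []
--
--     max_cols = len(probs[0])
--     prob_start_index = 0
--     for col in range(max_cols):
--         if all(p[col] == " " for p in probs):
--             # We've reached the end of a problem.
--             problem_list.append(tuple(p[prob_start_index:col] for p in probs))
--             prob_start_index = col + 1
--
--     # Add the last problem.
--     problem_list.append(tuple(p[prob_start_index:] for p in probs))
--     return problem_list
-- ===== SOURCE B (Python) =====
-- def split_to_problems(probs: list[str]) -> list[list[str]]: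
--     # Row-wise algorithm: intersect the rows' space-position sets to find the
--     # cut columns, then distribute each row's characters into pieces one char
--     # at a time, and transpose the per-row piece lists into problem tuples.
--     sep = {i for i, ch in enumerate(probs[0]) if ch == " "}
--     for p in probs[1:]:
--         sep &= {i for i, ch in enumerate(p) if ch == " "}
--     rows = []
--     for p in probs:
--         pieces, cur = [], []
--         for i, ch in enumerate(p):
--             if i in sep:
--                 pieces.append("".join(cur))
--                 cur = []
--             else:
--                 cur.append(ch)
--         pieces.append("".join(cur))
--         rows.append(pieces)
--     return list(zip(*rows))
-- ===== Notes on version B (the rewrite author's own statement) =====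
-- stated objective: alternative
-- what changed: A scans columns left-to-right and slices rows at a running start index; B works row-wise instead: it intersects the rows' space-position sets to get the cut columns, splits each row by distributing its characters one at a time into pieces, and transposes the per-row piece lists with zip(*rows).
import Mathlib
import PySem

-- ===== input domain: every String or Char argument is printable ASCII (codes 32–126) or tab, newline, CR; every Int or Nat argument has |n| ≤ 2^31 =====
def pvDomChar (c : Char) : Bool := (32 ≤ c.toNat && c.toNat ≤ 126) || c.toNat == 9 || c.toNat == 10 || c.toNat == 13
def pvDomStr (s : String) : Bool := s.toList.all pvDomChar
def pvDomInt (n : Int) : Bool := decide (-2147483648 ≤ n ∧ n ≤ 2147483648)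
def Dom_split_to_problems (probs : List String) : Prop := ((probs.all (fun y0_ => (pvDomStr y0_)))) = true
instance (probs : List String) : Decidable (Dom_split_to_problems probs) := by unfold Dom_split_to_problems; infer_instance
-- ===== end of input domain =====

-- B replaces A's left-to-right column scan (slice rows at a running start index) by a
-- row-wise algorithm: intersect the rows' space-position sets, distribute each row's
-- characters into pieces, transpose with zip(*rows); objective: alternative, same cost.

-- ===== PORT A =====
def split_to_problems (probs : List String) : List (List String) :=
  let max_cols := PySem.Str.len (PySem.List.pyGetD probs 0 "")
  let st :=
    (PySem.List.pyRange 0 max_cols 1).foldl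
      (fun (st : List (List String) × Int) col =>
        if probs.all (fun p => PySem.Str.pyGet? p col == some ' ') then
          (st.1 ++ [probs.map (fun p => PySem.Str.slice p (some st.2) (some col))], col + 1)
        else st)
      ([], 0)
  st.1 ++ [probs.map (fun p => PySem.Str.slice p (some st.2) none)]

-- ===== PORT B =====
-- hand port of Python's enumerate(p) over a string (exact: pairs (index, char) from 0)
def pvEnum (k : Int) : List Char → List (Int × Char)
  | [] => []
  | c :: cs => (k, c) :: pvEnum (k + 1) cs

-- {i for i, ch in enumerate(p) if ch == ' '}
def pvSpacePos (p : String) : PySem.Set Int :=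
  PySem.Set.ofList (((pvEnum 0 p.toList).filter (fun ic => ic.2 == ' ')).map (fun ic => ic.1))

-- hand port of zip(*rows) (exact: truncates to the shortest row, tuple = row order)
def pvZipStar (rows : List (List String)) : List (List String) :=
  match rows with
  | [] => []
  | r :: rs =>
    (List.range (rs.foldl (fun a row => min a row.length) r.length)).map
      (fun k => (r :: rs).map (fun row => row.getD k ""))

def split_to_problems_alt (probs : List String) : List (List String) :=
  let sep := (PySem.List.slice probs (some 1) none).foldl
      (fun s p => PySem.Set.inter s (pvSpacePos p))
      (pvSpacePos (PySem.List.pyGetD probs 0 ""))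
  let rows := probs.map (fun p =>
    let st := (pvEnum 0 p.toList).foldl
      (fun (st : List String × List Char) ic =>
        if PySem.Set.contains sep ic.1 then (st.1 ++ [String.ofList st.2], ([] : List Char))
        else (st.1, st.2 ++ [ic.2]))
      ([], [])
    st.1 ++ [String.ofList st.2])
  pvZipStar rows

-- ===== PRECONDITION & SPEC =====
-- Pre_ excludes exactly the inputs where Python A raises: the empty list (probs[0] is an
-- IndexError) and inputs where, at some scanned column, the first row failing the
-- "space at this column" test fails it by being too short (p[col] is an IndexError)
-- rather than by holding a non-space character there (all() short-circuits in row order).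
def Pre_split_to_problems (probs : List String) : Prop :=
  probs ≠ [] ∧
  ∀ col < (probs.headD "").toList.length, ∀ j < probs.length,
    (probs[j]?.getD "").toList.length ≤ col →
      ∃ i < j, col < (probs[i]?.getD "").toList.length ∧
        (probs[i]?.getD "").toList[col]? ≠ some ' '
instance (probs : List String) : Decidable (Pre_split_to_problems probs) := by
  unfold Pre_split_to_problems; infer_instance

def pvWitness_split_to_problems : List String := ["12 34", "+5 67"]

def Spec_split_to_problems (probs : List String) (out : List (List String)) : Prop := out = split_to_problems_alt probs
instance (probs : List String) (out : List (List String)) : Decidable (Spec_split_to_problems probs out) := by unfold Spec_split_to_problems; infer_instance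

-- ===== CLAIM (what is proved, stated in full; the proofs are below) =====
def Claim_equal_split_to_problems : Prop := ∀ (probs : List String), Dom_split_to_problems probs → Pre_split_to_problems probs → Spec_split_to_problems probs (split_to_problems probs)

-- ===== LEMMAS AND PROOFS =====

-- Reference splitter: pvCuts memb k cs cuts cs at the absolute positions (counted from
-- offset k) where memb holds, keeping empty pieces; always at least one piece.
def pvCuts (memb : Int → Bool) : Int → List Char → List (List Char)
  | _, [] => [[]]
  | k, c :: cs =>
    if memb k then [] :: pvCuts memb (k + 1) cs
    else (c :: (pvCuts memb (k + 1) cs).headD []) :: (pvCuts memb (k + 1) cs).tail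

-- the (start, stop?) bound pairs B's pieces / A's slices correspond to
def pvBoundsFrom (a : Int) (S : List Int) : List (Int × Option Int) :=
  (a :: S.map (· + 1)).zip (S.map some ++ [none])

-- the piece of cs a bound pair denotes (clamped drop/take, as Python slicing)
def pvChunk (cs : List Char) (ab : Int × Option Int) : List Char :=
  match ab.2 with
  | some b => (cs.drop ab.1.toNat).take (b.toNat - ab.1.toNat)
  | none => cs.drop ab.1.toNat

theorem pvCuts_ne_nil (memb : Int → Bool) (k : Int) (cs : List Char) :
    pvCuts memb k cs ≠ [] := by
  cases cs with
  | nil => simp [pvCuts]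
  | cons c cs => simp only [pvCuts]; split <;> simp

theorem pvCuts_no_cut (memb : Int → Bool) (cs : List Char) : ∀ (a : Int),
    (∀ i, a ≤ i → memb i = false) → pvCuts memb a cs = [cs] := by
  induction cs with
  | nil => intro a _; rfl
  | cons c cs ih =>
    intro a h
    have h0 : memb a = false := h a le_rfl
    have := ih (a + 1) (fun i hi => h i (by omega))
    simp [pvCuts, h0, this]

theorem pvCuts_split (memb : Int → Bool) (cs : List Char) : ∀ (a b : Int), a ≤ b →
    b < a + cs.length → (∀ i, a ≤ i → i < b → memb i = false) → memb b = true →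
    pvCuts memb a cs
      = cs.take (b - a).toNat :: pvCuts memb (b + 1) (cs.drop ((b - a).toNat + 1)) := by
  induction cs with
  | nil => intro a b hab hlt _ _; simp at hlt; omega
  | cons c cs ih =>
    intro a b hab hlt h1 h2
    rcases eq_or_lt_of_le hab with heq | hlt2
    · rw [← heq] at h2 ⊢
      simp [pvCuts, h2]
    · have h0 : memb a = false := h1 a le_rfl hlt2
      have hrec := ih (a + 1) b (by omega) (by simp at hlt ⊢; omega)
        (fun i hi hib => h1 i (by omega) hib) h2
      have hn1 : (b - a).toNat = (b - (a + 1)).toNat + 1 := by omega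
      simp only [pvCuts, h0, Bool.false_eq_true, if_neg, not_false_iff, hrec, hn1,
        List.take_succ_cons, List.headD_cons, List.tail_cons, List.drop_succ_cons]

-- B's per-row fold is acc/cur-threaded pvCuts
theorem pvFold_cut (memb : Int → Bool) (cs : List Char) : ∀ (k : Int)
    (acc : List String) (cur : List Char),
    (fun st : List String × List Char => st.1 ++ [String.ofList st.2])
      ((pvEnum k cs).foldl
        (fun (st : List String × List Char) ic =>
          if memb ic.1 then (st.1 ++ [String.ofList st.2], ([] : List Char))
          else (st.1, st.2 ++ [ic.2]))
        (acc, cur))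
    = acc ++ ((pvCuts memb k cs).modifyHead (cur ++ ·)).map String.ofList := by
  induction cs with
  | nil => intro k acc cur; simp [pvEnum, pvCuts]
  | cons c cs ih =>
    intro k acc cur
    by_cases h : memb k
    · simp only [pvEnum, List.foldl_cons, h, if_pos]
      have ih' := ih (k + 1) (acc ++ [String.ofList cur]) []
      beta_reduce at ih'
      rw [ih']
      simp only [pvCuts, h, if_pos, List.modifyHead_cons, List.map_cons, List.append_assoc,
        List.cons_append, List.nil_append]
      cases pvCuts memb (k + 1) cs <;> simp
    · simp only [pvEnum, List.foldl_cons, h, Bool.false_eq_true, if_neg, not_false_iff]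
      have ih' := ih (k + 1) acc (cur ++ [c])
      beta_reduce at ih'
      rw [ih']
      have hne := pvCuts_ne_nil memb (k + 1) cs
      obtain ⟨hd, tl, hht⟩ : ∃ hd tl, pvCuts memb (k + 1) cs = hd :: tl :=
        List.exists_cons_of_ne_nil hne
      simp [pvCuts, h, hht]

-- pvCuts at a sorted cut set = the chunks at the derived bounds
theorem pvCuts_eq_chunks (memb : Int → Bool) : ∀ (S : List Int) (a : Int) (cs : List Char),
    0 ≤ a → (∀ x, a ≤ x → memb x = decide (x ∈ S)) → S.Pairwise (· < ·) →
    (∀ s ∈ S, a ≤ s ∧ s < cs.length) →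
    pvCuts memb a (cs.drop a.toNat) = (pvBoundsFrom a S).map (pvChunk cs) := by
  intro S
  induction S with
  | nil =>
    intro a cs h0 hm _ _
    rw [pvCuts_no_cut memb _ a (fun i hi => by rw [hm i hi]; simp)]
    simp [pvBoundsFrom, pvChunk]
  | cons s S' ih =>
    intro a cs h0 hm hsort hbnd
    obtain ⟨has, hsl⟩ := hbnd s (List.mem_cons_self ..)
    have hms : memb s = true := by rw [hm s has]; simp
    have hgt : ∀ y ∈ S', s < y := fun y hy => List.rel_of_pairwise_cons hsort hy
    have h1 : ∀ i, a ≤ i → i < s → memb i = false := by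
      intro i hi his
      rw [hm i hi]
      simp only [List.mem_cons, decide_eq_false_iff_not, not_or]
      exact ⟨by omega, fun hmem => absurd (hgt i hmem) (by omega)⟩
    rw [pvCuts_split memb _ a s has
      (by simp only [List.length_drop]; omega) h1 hms]
    have hdd : (cs.drop a.toNat).drop ((s - a).toNat + 1) = cs.drop (s + 1).toNat := by
      rw [List.drop_drop]
      congr 1
      omega
    rw [hdd]
    have hm' : ∀ x, s + 1 ≤ x → memb x = decide (x ∈ S') := by
      intro x hx
      rw [hm x (by omega)]
      simp [List.mem_cons, show x ≠ s by omega]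
    rw [ih (s + 1) cs (by omega) hm' (List.Pairwise.of_cons hsort)
      (fun y hy => ⟨by have := hgt y hy; omega, (hbnd y (List.mem_cons_of_mem _ hy)).2⟩)]
    have hbf : pvBoundsFrom a (s :: S') = (a, some s) :: pvBoundsFrom (s + 1) S' := by
      simp [pvBoundsFrom]
    rw [hbf]
    simp only [List.map_cons, pvChunk]
    congr 2
    omega

theorem pvEnum_mem (i : Int) (c : Char) : ∀ (cs : List Char) (k : Int),
    ((i, c) ∈ pvEnum k cs ↔ k ≤ i ∧ cs[(i - k).toNat]? = some c) := by
  intro cs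
  induction cs with
  | nil => intro k; simp [pvEnum]
  | cons d cs ih =>
    intro k
    rw [pvEnum, List.mem_cons, ih (k + 1)]
    by_cases hik : i = k
    · subst hik
      have h0 : (i - i).toNat = 0 := by omega
      simp only [Prod.mk.injEq, true_and, h0, List.getElem?_cons_zero]
      constructor
      · rintro (rfl | ⟨h1, _⟩)
        · exact ⟨le_rfl, rfl⟩
        · omega
      · rintro ⟨_, h2⟩
        left
        exact (Option.some_inj.mp h2).symm
    · have hne : ((i, c) = (k, d)) = False := by
        simp only [Prod.mk.injEq, eq_iff_iff, iff_false, not_and]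
        intro h; exact absurd h hik
      have hsucc : k + 1 ≤ i → (i - k).toNat = (i - (k + 1)).toNat + 1 := by omega
      rw [hne]
      simp only [false_or]
      constructor
      · rintro ⟨h1, h2⟩
        refine ⟨by omega, ?_⟩
        rw [hsucc h1, List.getElem?_cons_succ]
        exact h2
      · rintro ⟨h1, h2⟩
        have h1' : k + 1 ≤ i := by omega
        rw [hsucc h1', List.getElem?_cons_succ] at h2
        exact ⟨h1', h2⟩

-- membership in one row's space-position set
theorem pvSpacePos_contains (p : String) (x : Int) (hx : 0 ≤ x) :
    PySem.Set.contains (pvSpacePos p) x = (PySem.Str.pyGet? p x == some ' ') := by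
  have hget : PySem.Str.pyGet? p x = p.toList[x.toNat]? := by
    simp [PySem.List.pyGet?_of_nonneg _ hx]
  have hmem : x ∈ pvSpacePos p ↔ p.toList[x.toNat]? = some ' ' := by
    unfold pvSpacePos
    rw [PySem.Set.mem_ofList, List.mem_map]
    constructor
    · rintro ⟨⟨a, c⟩, hf, rfl⟩
      rw [List.mem_filter] at hf
      obtain ⟨hmem', hc⟩ := hf
      rw [pvEnum_mem] at hmem'
      simp only [beq_iff_eq] at hc
      subst hc
      simpa using hmem'.2
    · intro h
      refine ⟨(x, ' '), ?_, rfl⟩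
      rw [List.mem_filter, pvEnum_mem]
      exact ⟨⟨hx, by simpa using h⟩, by simp⟩
  rw [PySem.Set.contains, hget]
  by_cases h : p.toList[x.toNat]? = some ' ' <;>
    simp [List.contains_eq_mem, hmem, h]

-- membership after the intersection fold
theorem pvSep_contains (q : String) (qs : List String) (x : Int) (hx : 0 ≤ x) :
    PySem.Set.contains
      ((PySem.List.slice (q :: qs) (some 1) none).foldl
        (fun s p => PySem.Set.inter s (pvSpacePos p))
        (pvSpacePos (PySem.List.pyGetD (q :: qs) 0 ""))) x
    = (q :: qs).all (fun p => PySem.Str.pyGet? p x == some ' ') := by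
  have hfold : ∀ (l : List String) (s0 : PySem.Set Int),
      (l.foldl (fun s p => PySem.Set.inter s (pvSpacePos p)) s0).contains x
      = (s0.contains x && l.all (fun p => (pvSpacePos p).contains x)) := by
    intro l
    induction l with
    | nil => intro s0; simp
    | cons p l ihl =>
      intro s0
      rw [List.foldl_cons, ihl]
      have hint : (PySem.Set.inter s0 (pvSpacePos p)).contains x
          = (s0.contains x && (pvSpacePos p).contains x) := by
        simp [PySem.Set.inter, PySem.Set.contains, List.mem_filter]
      rw [hint]
      simp [Bool.and_assoc]
  rw [PySem.List.slice_from_one, List.tail_cons, PySem.List.pyGetD_zero_cons, hfold]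
  rw [pvSpacePos_contains q x hx, List.all_cons]
  congr 1
  have hall : ∀ (l : List String), l.all (fun p => (pvSpacePos p).contains x)
      = l.all (fun p => PySem.Str.pyGet? p x == some ' ') := by
    intro l
    induction l with
    | nil => rfl
    | cons p l ihl => rw [List.all_cons, List.all_cons, pvSpacePos_contains p x hx, ihl]
  exact hall qs

-- transpose of a rectangular map-of-maps
theorem pvZipStar_map_map (q : String) (qs : List String) (bs : List (Int × Option Int))
    (g : String → Int × Option Int → String) :
    pvZipStar ((q :: qs).map (fun p => bs.map (g p)))
      = bs.map (fun b => (q :: qs).map (fun p => g p b)) := by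
  have hminfold : ∀ (l : List (List String)) (L : Nat), (∀ r ∈ l, r.length = L) →
      l.foldl (fun a row => min a row.length) L = L := by
    intro l
    induction l with
    | nil => intro L _; rfl
    | cons r l ihl =>
      intro L h
      rw [List.foldl_cons, h r (List.mem_cons_self ..), min_self]
      exact ihl L (fun r' hr' => h r' (List.mem_cons_of_mem _ hr'))
  simp only [List.map_cons, pvZipStar]
  rw [hminfold _ (bs.map (g q)).length
    (by intro r hr; rw [List.mem_map] at hr; obtain ⟨p, _, rfl⟩ := hr; simp)]
  simp only [List.length_map]
  apply List.ext_getElem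
  · simp
  · intro i h1 h2
    simp only [List.getElem_map, List.getElem_range]
    have hi : i < bs.length := by simpa using h1
    have hgetD : ∀ p : String, (bs.map (g p)).getD i "" = g p bs[i] := by
      intro p
      rw [List.getD_eq_getElem?_getD, List.getElem?_map, List.getElem?_eq_getElem hi]
      rfl
    rw [hgetD q]
    congr 1
    rw [List.map_map]
    exact List.map_congr_left (fun p _ => hgetD p)

-- A's scan over any column list L, with accumulator (acc, s), produces exactly the
-- blocks at the bounds derived from the separator columns of L.
theorem pv_core (P : Int → Bool) (blk : Int → Option Int → List String) :
    ∀ (L : List Int) (acc : List (List String)) (s : Int),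
    (let st := L.foldl
        (fun (st : List (List String) × Int) col =>
          if P col then (st.1 ++ [blk st.2 (some col)], col + 1) else st)
        (acc, s)
     st.1 ++ [blk st.2 none])
    = acc ++ (pvBoundsFrom s (L.filter P)).map (fun ab => blk ab.1 ab.2) := by
  intro L
  induction L with
  | nil => intro acc s; simp [pvBoundsFrom]
  | cons c L ih =>
    intro acc s
    by_cases h : P c
    · simp only [List.foldl_cons, List.filter_cons, h, if_pos, pvBoundsFrom, List.map_cons,
        List.zip_cons_cons, List.cons_append]
      rw [ih (acc ++ [blk s (some c)]) (c + 1)]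
      simp [pvBoundsFrom]
    · simp only [List.foldl_cons, List.filter_cons, h, if_neg, Bool.false_eq_true,
        not_false_iff]
      exact ih acc s

-- a slice at a nonnegative bound pair is the chunk
theorem pvSlice_chunk (p : String) (ab : Int × Option Int) (ha : 0 ≤ ab.1)
    (hb : ∀ b, ab.2 = some b → 0 ≤ b) :
    PySem.Str.slice p (some ab.1) ab.2 = String.ofList (pvChunk p.toList ab) := by
  obtain ⟨a, b?⟩ := ab
  cases b? with
  | none =>
    simp only [pvChunk]
    rw [PySem.Str.slice]
    congr 1
    simp only [PySem.Chars.slice_eq_listSlice]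
    exact PySem.List.slice_from _ ha
  | some b =>
    simp only [pvChunk]
    rw [PySem.Str.slice]
    congr 1
    simp only [PySem.Chars.slice_eq_listSlice]
    exact PySem.List.slice_toNat _ ha (hb b rfl)

-- the canonical value both ports equal: blocks at the bounds derived from the separator columns
def pvCanon (q : String) (qs : List String) : List (List String) :=
  (pvBoundsFrom 0 ((PySem.List.pyRange 0 (PySem.Str.len q) 1).filter
      (fun col => (q :: qs).all (fun p => PySem.Str.pyGet? p col == some ' ')))).map
    (fun ab => (q :: qs).map (fun p => String.ofList (pvChunk p.toList ab)))

theorem pvS_nonneg (q : String) (qs : List String) (s : Int)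
    (hs : s ∈ (PySem.List.pyRange 0 (PySem.Str.len q) 1).filter
      (fun col => (q :: qs).all (fun p => PySem.Str.pyGet? p col == some ' '))) :
    0 ≤ s := by
  rw [List.mem_filter, PySem.List.mem_pyRange_one] at hs
  exact hs.1.1

theorem pvA_eq (q : String) (qs : List String) :
    split_to_problems (q :: qs) = pvCanon q qs := by
  have h := pv_core (fun col => (q :: qs).all (fun p => PySem.Str.pyGet? p col == some ' '))
      (fun a b => (q :: qs).map (fun p => PySem.Str.slice p (some a) b))
      (PySem.List.pyRange 0 (PySem.Str.len q) 1) [] 0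
  rw [List.nil_append] at h
  simp only [split_to_problems, PySem.List.pyGetD_zero_cons]
  refine h.trans ?_
  unfold pvCanon
  apply List.map_congr_left
  intro ab hab
  apply List.map_congr_left
  intro p _
  obtain ⟨a, b?⟩ := ab
  have hz := List.of_mem_zip hab
  have ha : 0 ≤ a := by
    rcases List.mem_cons.mp hz.1 with h1 | h1
    · omega
    · rw [List.mem_map] at h1
      obtain ⟨s, hs, rfl⟩ := h1
      have := pvS_nonneg q qs s hs
      omega
  have hb : ∀ b, b? = some b → 0 ≤ b := by
    intro b hbb
    subst hbb
    rcases List.mem_append.mp hz.2 with h1 | h1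
    · rw [List.mem_map] at h1
      obtain ⟨s, hs, hss⟩ := h1
      obtain rfl : s = b := Option.some_inj.mp hss
      exact pvS_nonneg q qs s hs
    · simp at h1
  exact pvSlice_chunk p (a, b?) ha hb

theorem pvB_eq (q : String) (qs : List String) :
    split_to_problems_alt (q :: qs) = pvCanon q qs := by
  have hP_len : ∀ (x : Int) (p : String), 0 ≤ x → p ∈ q :: qs →
      ((q :: qs).all (fun r => PySem.Str.pyGet? r x == some ' ')) = true →
      x < (p.toList.length : Int) := by
    intro x p hx hp hall
    rw [List.all_eq_true] at hall
    have hg := hall p hp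
    rw [beq_iff_eq,
      show PySem.Str.pyGet? p x = p.toList[x.toNat]? from by
        simp [PySem.List.pyGet?_of_nonneg _ hx]] at hg
    have hlt := (List.getElem?_eq_some_iff.mp hg).1
    omega
  have hmemb : ∀ (x : Int), 0 ≤ x →
      PySem.Set.contains ((PySem.List.slice (q :: qs) (some 1) none).foldl
        (fun s p => PySem.Set.inter s (pvSpacePos p))
        (pvSpacePos (PySem.List.pyGetD (q :: qs) 0 ""))) x
      = decide (x ∈ (PySem.List.pyRange 0 (PySem.Str.len q) 1).filter
          (fun col => (q :: qs).all (fun p => PySem.Str.pyGet? p col == some ' '))) := by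
    intro x hx
    rw [pvSep_contains q qs x hx]
    by_cases hPx : (q :: qs).all (fun p => PySem.Str.pyGet? p x == some ' ') = true
    · have hxn : x < PySem.Str.len q := by
        rw [PySem.Str.len_eq]
        exact hP_len x q hx (List.mem_cons_self ..) hPx
      have hxS : x ∈ (PySem.List.pyRange 0 (PySem.Str.len q) 1).filter
          (fun col => (q :: qs).all (fun p => PySem.Str.pyGet? p col == some ' ')) :=
        List.mem_filter.mpr ⟨PySem.List.mem_pyRange_one.mpr ⟨hx, hxn⟩, hPx⟩
      rw [hPx, decide_eq_true hxS]
    · have hxS : x ∉ (PySem.List.pyRange 0 (PySem.Str.len q) 1).filter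
          (fun col => (q :: qs).all (fun p => PySem.Str.pyGet? p col == some ' ')) :=
        fun hmem => hPx (List.mem_filter.mp hmem).2
      rw [Bool.not_eq_true] at hPx
      rw [hPx, decide_eq_false hxS]
  have hsort : ((PySem.List.pyRange 0 (PySem.Str.len q) 1).filter
      (fun col => (q :: qs).all (fun p => PySem.Str.pyGet? p col == some ' '))).Pairwise
      (· < ·) :=
    (PySem.List.pairwise_lt_pyRange_one 0 (PySem.Str.len q)).filter _
  have hmod : ∀ (l : List (List Char)), l.modifyHead (fun x => [] ++ x) = l := by
    intro l; cases l <;> simp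
  have hrow : ∀ p ∈ q :: qs,
      (fun st : List String × List Char => st.1 ++ [String.ofList st.2])
        ((pvEnum 0 p.toList).foldl
          (fun (st : List String × List Char) ic =>
            if PySem.Set.contains ((PySem.List.slice (q :: qs) (some 1) none).foldl
                (fun s p => PySem.Set.inter s (pvSpacePos p))
                (pvSpacePos (PySem.List.pyGetD (q :: qs) 0 ""))) ic.1 then
              (st.1 ++ [String.ofList st.2], ([] : List Char))
            else (st.1, st.2 ++ [ic.2]))
          ([], []))
      = (pvBoundsFrom 0 ((PySem.List.pyRange 0 (PySem.Str.len q) 1).filter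
          (fun col => (q :: qs).all (fun p => PySem.Str.pyGet? p col == some ' ')))).map
          (fun ab => String.ofList (pvChunk p.toList ab)) := by
    intro p hp
    have h := pvFold_cut (PySem.Set.contains ((PySem.List.slice (q :: qs) (some 1) none).foldl
        (fun s p => PySem.Set.inter s (pvSpacePos p))
        (pvSpacePos (PySem.List.pyGetD (q :: qs) 0 "")))) p.toList 0 [] []
    rw [List.nil_append, hmod] at h
    have hbnd : ∀ s ∈ (PySem.List.pyRange 0 (PySem.Str.len q) 1).filter
        (fun col => (q :: qs).all (fun r => PySem.Str.pyGet? r col == some ' ')),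
        (0 : Int) ≤ s ∧ s < (p.toList.length : Int) := by
      intro s hs
      have h0 := pvS_nonneg q qs s hs
      exact ⟨h0, hP_len s p h0 hp (List.mem_filter.mp hs).2⟩
    have hc := pvCuts_eq_chunks (PySem.Set.contains ((PySem.List.slice (q :: qs) (some 1) none).foldl
        (fun s p => PySem.Set.inter s (pvSpacePos p))
        (pvSpacePos (PySem.List.pyGetD (q :: qs) 0 ""))))
      ((PySem.List.pyRange 0 (PySem.Str.len q) 1).filter
        (fun col => (q :: qs).all (fun r => PySem.Str.pyGet? r col == some ' ')))
      0 p.toList le_rfl (fun x hx => hmemb x hx) hsort hbnd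
    simp only [Int.toNat_zero, List.drop_zero] at hc
    rw [hc, List.map_map] at h
    exact h
  have hmap : (q :: qs).map (fun p =>
      (fun st : List String × List Char => st.1 ++ [String.ofList st.2])
        ((pvEnum 0 p.toList).foldl
          (fun (st : List String × List Char) ic =>
            if PySem.Set.contains ((PySem.List.slice (q :: qs) (some 1) none).foldl
                (fun s p => PySem.Set.inter s (pvSpacePos p))
                (pvSpacePos (PySem.List.pyGetD (q :: qs) 0 ""))) ic.1 then
              (st.1 ++ [String.ofList st.2], ([] : List Char))
            else (st.1, st.2 ++ [ic.2]))
          ([], [])))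
      = (q :: qs).map (fun p =>
          (pvBoundsFrom 0 ((PySem.List.pyRange 0 (PySem.Str.len q) 1).filter
            (fun col => (q :: qs).all (fun r => PySem.Str.pyGet? r col == some ' ')))).map
            (fun ab => String.ofList (pvChunk p.toList ab))) :=
    List.map_congr_left hrow
  exact (congrArg pvZipStar hmap).trans
    (pvZipStar_map_map q qs _ (fun p ab => String.ofList (pvChunk p.toList ab)))

-- ===== VERDICT (by name: the statement is the Claim_ definition above) =====
set_option maxHeartbeats 1000000 in
theorem split_to_problems_spec : Claim_equal_split_to_problems := by
  intro probs _ hpre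
  unfold Spec_split_to_problems
  obtain ⟨q, qs, rfl⟩ := List.exists_cons_of_ne_nil hpre.1
  exact (pvA_eq q qs).trans (pvB_eq q qs).symm
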